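-- pv_equiv track=rewrite | github.com/FergusonAJ/ResearchCode | EcoEA/prototype_1/ea_utils.py | evaluateSpread
-- ===== SOURCE A (Python) =====
-- def evaluateSpread(gen, targetList):
--     D = {}
--     for target in targetList:
--         score = 0
--         for s in gen:
--             matches = 0
--             for i in range(len(target)):
--                 if s[i] == target[i]:
--                     matches += 1
--             score += matches
--             #l = len(target)
--             #S = 0
--             #bonus = 0
--             #if matches >= l/2:
--             #    S = (((2 * matches) / len(target)) - 1) ** 2
--             #if targetResources != None: #EcoEA
--             #    A = min(S * CONSUMPTION_FRAC * targetResources[target], MAX_AMOUNT)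
--             #    targetResources[target] -= A
--             #    bonus = 2 ** A
--             #else: #Naive
--             #    bonus = 2 ** S
--             #    bonus *= 5
--             #if score == 0:
--             #    score = bonus
--             #else:
--             #    score += bonus
--         D[target] = score
--     return D
-- ===== SOURCE B (Python) =====
-- def evaluateSpread(gen, targetList):
--     # Precompute per-position character counts over the genomes once,
--     # then score each target by summing the counts of its characters.
--     maxlen = 0
--     for t in targetList:
--         maxlen = max(maxlen, len(t))
--     freq = []
--     for i in range(maxlen):
--         c = {}
--         for s in gen:
--             c[s[i]] = c.get(s[i], 0) + 1
--         freq.append(c)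
--     D = {}
--     for t in targetList:
--         D[t] = sum(freq[i].get(t[i], 0) for i in range(len(t)))
--     return D
-- ===== Notes on version B (the rewrite author's own statement) =====
-- stated objective: faster
-- what changed: Instead of re-scanning every genome for every target (triple loop), B builds one per-position character-frequency table over the genomes and scores each target by summing L table lookups.
import Mathlib
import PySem

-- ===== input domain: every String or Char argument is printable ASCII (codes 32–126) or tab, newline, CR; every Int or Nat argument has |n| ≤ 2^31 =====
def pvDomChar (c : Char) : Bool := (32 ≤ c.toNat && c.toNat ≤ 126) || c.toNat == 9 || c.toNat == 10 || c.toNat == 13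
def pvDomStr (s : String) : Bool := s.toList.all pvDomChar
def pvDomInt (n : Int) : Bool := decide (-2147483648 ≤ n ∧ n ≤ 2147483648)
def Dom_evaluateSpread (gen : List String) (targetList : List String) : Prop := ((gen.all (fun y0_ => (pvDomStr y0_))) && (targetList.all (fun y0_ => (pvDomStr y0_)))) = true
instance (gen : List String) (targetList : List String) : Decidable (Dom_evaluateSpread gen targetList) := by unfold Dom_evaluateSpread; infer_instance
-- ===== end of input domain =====

-- B replaces A's triple loop (targets × genomes × positions) by a per-position
-- character-frequency table built once over the genomes, then scores each target
-- by summing table lookups.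

-- ===== PORT A =====
-- literal transliteration of A: for each target, for each genome, count positionwise matches
def evaluateSpread (gen : List String) (targetList : List String) : List (String × Int) :=
  (targetList.foldl (fun D target =>
      D.insert target (gen.foldl (fun score s =>
        score + (PySem.List.pyRange 0 (PySem.Str.len target) 1).foldl
          (fun mtch i =>
            if PySem.Str.pyGet? s i = PySem.Str.pyGet? target i then mtch + 1 else mtch) 0)
        0))
    (PySem.Dict.empty : PySem.Dict String Int)).items

-- ===== PORT B =====
-- maxlen = 0; for t in targetList: maxlen = max(maxlen, len(t))
def pvMaxLen (targetList : List String) : Int :=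
  targetList.foldl (fun m t => max m (PySem.Str.len t)) 0

-- c = {}; for s in gen: c[s[i]] = c.get(s[i], 0) + 1   (s[i] is in range inside Pre_, so getD is exact)
def pvFreq (gen : List String) (i : Int) : PySem.Dict Char Int :=
  (gen.map (fun s => (PySem.Str.pyGet? s i).getD ' ')).foldl
    (fun c ch => c.insert ch (c.getD ch 0 + 1)) PySem.Dict.empty

def evaluateSpread_alt (gen : List String) (targetList : List String) : List (String × Int) :=
  let freq := (PySem.List.pyRange 0 (pvMaxLen targetList) 1).map (pvFreq gen)
  -- D[t] = sum(freq[i].get(t[i], 0) for i in range(len(t)))   (t[i] is in range, so getD is exact)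
  (targetList.foldl (fun D t =>
      D.insert t (((PySem.List.pyRange 0 (PySem.Str.len t) 1).map
        (fun i => (PySem.List.pyGetD freq i PySem.Dict.empty).getD
            ((PySem.Str.pyGet? t i).getD ' ') 0)).sum))
    (PySem.Dict.empty : PySem.Dict String Int)).items

-- ===== PRECONDITION & SPEC =====
-- Pre_ excludes exactly the inputs where A raises IndexError: some genome shorter than some target.
def Pre_evaluateSpread (gen : List String) (targetList : List String) : Prop :=
  ∀ t ∈ targetList, ∀ s ∈ gen, PySem.Str.len t ≤ PySem.Str.len s
instance (gen : List String) (targetList : List String) : Decidable (Pre_evaluateSpread gen targetList) := by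
  unfold Pre_evaluateSpread; infer_instance

def pvWitness_evaluateSpread : List String × List String := (["ab", "cb"], ["ab", "bb"])

def Spec_evaluateSpread (gen : List String) (targetList : List String) (out : List (String × Int)) : Prop :=
  out = evaluateSpread_alt gen targetList
instance (gen : List String) (targetList : List String) (out : List (String × Int)) : Decidable (Spec_evaluateSpread gen targetList out) := by unfold Spec_evaluateSpread; infer_instance

-- ===== CLAIM (what is proved, stated in full; the proofs are below) =====
def Claim_equal_evaluateSpread : Prop := ∀ (gen : List String) (targetList : List String), Dom_evaluateSpread gen targetList → Pre_evaluateSpread gen targetList → Spec_evaluateSpread gen targetList (evaluateSpread gen targetList)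

-- ===== LEMMAS AND PROOFS =====

-- double sum commutation
lemma pvSumComm {α β : Type} (l1 : List α) (l2 : List β) (g : α → β → Int) :
    (l1.map (fun a => (l2.map (fun b => g a b)).sum)).sum
  = (l2.map (fun b => (l1.map (fun a => g a b)).sum)).sum := by
  induction l1 with
  | nil => simp
  | cons a l ih =>
      simp only [List.map_cons, List.sum_cons, ih]
      rw [← PySem.List.sum_map_add_int]

-- per-target scores agree inside Pre_
lemma pvScoreEq (gen : List String) (targetList : List String) (t : String)
    (ht : t ∈ targetList) (hpre : ∀ s ∈ gen, PySem.Str.len t ≤ PySem.Str.len s) :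
    (gen.foldl (fun score s =>
        score + (PySem.List.pyRange 0 (PySem.Str.len t) 1).foldl
          (fun mtch i =>
            if PySem.Str.pyGet? s i = PySem.Str.pyGet? t i then mtch + 1 else mtch) 0) 0)
  = ((PySem.List.pyRange 0 (PySem.Str.len t) 1).map
      (fun i => (PySem.List.pyGetD ((PySem.List.pyRange 0 (pvMaxLen targetList) 1).map (pvFreq gen))
          i PySem.Dict.empty).getD ((PySem.Str.pyGet? t i).getD ' ') 0)).sum := by
  have hmax : PySem.Str.len t ≤ pvMaxLen targetList :=
    (PySem.List.le_foldl_max_int targetList (fun u => PySem.Str.len u) 0).2 t ht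
  rw [PySem.List.foldl_add]
  rw [List.map_congr_left (g := fun s =>
      ((PySem.List.pyRange 0 (PySem.Str.len t) 1).map
        (fun i => if PySem.Str.pyGet? s i = PySem.Str.pyGet? t i then (1 : Int) else 0)).sum)
      (fun s _ => by
        rw [PySem.List.foldl_ite_add_one, zero_add, ← PySem.List.sum_map_ite_one_zero]
        exact congrArg List.sum (List.map_congr_left fun x _ => by split_ifs <;> simp_all))]
  rw [zero_add, pvSumComm]
  refine congrArg List.sum (List.map_congr_left ?_)
  intro i hi
  rw [PySem.List.mem_pyRange_one] at hi
  rw [PySem.List.pyGetD_map_pyRange_of_nonneg _ _ _ _ hi.1 (lt_of_lt_of_le hi.2 hmax)]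
  unfold pvFreq
  rw [PySem.Dict.getD_foldl_insert_add_one]
  simp only [PySem.Dict.getD_empty, zero_add]
  rw [List.count, List.countP_map]
  -- t[i] exists at this position
  have hlen : i.toNat < t.toList.length := by
    have := hi.2; rw [PySem.Str.len_eq] at this; omega
  have hti : PySem.List.pyGet? t.toList i = some (t.toList[i.toNat]'hlen) :=
    PySem.List.pyGet?_eq_some_getElem t.toList hi.1
      (by have := hi.2; rw [PySem.Str.len_eq] at this; exact_mod_cast this)
  have h1 : (List.map (fun s => if PySem.Str.pyGet? s i = PySem.Str.pyGet? t i then (1 : Int) else 0) gen).sum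
      = ((gen.countP (fun s => decide (PySem.Str.pyGet? s i = PySem.Str.pyGet? t i)) : Int)) := by
    rw [← PySem.List.sum_map_ite_one_zero]
    exact congrArg List.sum (List.map_congr_left fun x _ => by split_ifs <;> simp_all)
  rw [h1]
  norm_cast
  apply List.countP_congr
  intro s hs
  have hsi : PySem.List.pyGet? s.toList i = some (s.toList[i.toNat]'(by
      have h1 := hpre s hs; have h2 := hi.2
      simp only [PySem.Str.len_eq] at h1 h2; omega)) :=
    PySem.List.pyGet?_eq_some_getElem s.toList hi.1
      (by have h1 := hpre s hs; have h2 := hi.2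
          simp only [PySem.Str.len_eq] at h1 h2; exact_mod_cast (by omega : i < (s.toList.length : Int)))
  simp [PySem.Str.pyGet?, PySem.Chars.pyGet?, hti, hsi]

theorem evaluateSpread_spec : Claim_equal_evaluateSpread := by
  intro gen targetList _ hpre
  unfold Spec_evaluateSpread evaluateSpread evaluateSpread_alt
  congr 1
  apply PySem.List.foldl_congr_mem
  intro acc u hu
  rw [pvScoreEq gen targetList u hu (hpre u hu)]
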